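-- pv_equiv track=rewrite | github.com/zig-for/Archipelago | Utils.py | parse_player_names
-- ===== SOURCE A (Python) =====
-- def parse_player_names(names, players, teams):
--     names = tuple(n for n in (n.strip() for n in names.split(",")) if n)
--     if len(names) != len(set(names)):
--         raise ValueError("Duplicate Player names is not supported.")
--     ret = []
--     while names or len(ret) < teams:
--         team = [n[:16] for n in names[:players]]
--         # 16 bytes in rom per player, which will map to more in unicode, but those characters later get filtered
--         while len(team) != players:
--             team.append(f"Player{len(team) + 1}")
--         ret.append(team)
--
--         names = names[players:]
--     return ret
-- ===== SOURCE B (Python) =====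
-- def parse_player_names(names, players, teams):
--     cleaned = [n for n in (n.strip() for n in names.split(",")) if n]
--     if len(cleaned) != len(set(cleaned)):
--         raise ValueError("Duplicate Player names is not supported.")
--     if players <= 0:
--         return [[] for _ in range(teams)]
--     n_teams = max(teams, -(-len(cleaned) // players))
--     ret = []
--     for i in range(n_teams):
--         team = [n[:16] for n in cleaned[i * players:(i + 1) * players]]
--         team += [f"Player{j + 1}" for j in range(len(team), players)]
--         ret.append(team)
--     return ret
-- ===== Notes on version B (the rewrite author's own statement) =====
-- stated objective: simpler
-- what changed: Instead of A's compound-condition while-loop that destructively re-slices the name tuple and pads each team with an inner while-loop, B precomputes the number of teams as max(teams, ceil(len(names)/players)) and builds the result in a single indexed for-loop that slices each chunk by position and pads it with a comprehension.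
import Mathlib
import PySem

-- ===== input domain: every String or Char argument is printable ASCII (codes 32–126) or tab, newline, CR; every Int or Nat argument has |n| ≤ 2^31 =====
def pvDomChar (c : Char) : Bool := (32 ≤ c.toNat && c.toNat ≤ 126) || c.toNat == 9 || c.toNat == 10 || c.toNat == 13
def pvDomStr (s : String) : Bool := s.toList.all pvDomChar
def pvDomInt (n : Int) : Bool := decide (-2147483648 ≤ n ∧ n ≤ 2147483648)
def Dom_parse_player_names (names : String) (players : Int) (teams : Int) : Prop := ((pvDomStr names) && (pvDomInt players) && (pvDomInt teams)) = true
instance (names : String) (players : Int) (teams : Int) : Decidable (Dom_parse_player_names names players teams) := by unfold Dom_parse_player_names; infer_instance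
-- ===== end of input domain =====

-- B replaces A's destructive re-slicing consume-loop by a precomputed team count and one indexed
-- pass slicing each chunk by position (objective: simpler decomposition; same return value on Pre_).

-- ===== PORT A =====
-- n[:16]  (identical expression in both Pythons)
def pvTrunc16 (n : String) : String := PySem.Str.slice n none (some 16)

-- [n for n in (n.strip() for n in names.split(",")) if n]  (identical line in both Pythons)
def pvClean (names : String) : List String :=
  (((PySem.Str.split? names ",").getD []).map PySem.Str.strip).filter (fun n => n ≠ "")

-- inner `while len(team) != players: team.append(f"Player{len(team) + 1}")`; fuel bounds the appends
def pvPadA : Nat → List String → Int → List String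
  | 0, team, _ => team
  | f + 1, team, players =>
    if (team.length : Int) = players then team
    else pvPadA f (team ++ ["Player" ++ PySem.Int.toStr ((team.length : Int) + 1)]) players

-- outer `while names or len(ret) < teams:` loop; fuel bounds the iterations
def pvLoopA : Nat → List String → List (List String) → Int → Int → List (List String)
  | 0, _, ret, _, _ => ret
  | f + 1, names, ret, players, teams =>
    if names ≠ [] ∨ (ret.length : Int) < teams then
      pvLoopA f (PySem.List.slice names (some players) none)
        (ret ++ [pvPadA (players - (((PySem.List.slice names none (some players)).map pvTrunc16).length : Int)).toNat
                   ((PySem.List.slice names none (some players)).map pvTrunc16) players])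
        players teams
    else ret

def parse_player_names (names : String) (players : Int) (teams : Int) : List (List String) :=
  let cleaned := pvClean names
  if cleaned.length ≠ (PySem.Set.ofList cleaned).length then []  -- Python raises ValueError here; excluded by Pre_
  else pvLoopA (cleaned.length + teams.toNat) cleaned [] players teams

-- ===== PORT B =====
def parse_player_names_alt (names : String) (players : Int) (teams : Int) : List (List String) :=
  let cleaned := pvClean names
  if cleaned.length ≠ (PySem.Set.ofList cleaned).length then []  -- raise ValueError; excluded by Pre_
  else if players ≤ 0 then
    (PySem.List.pyRange 0 teams).map (fun _ => ([] : List String))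
  else
    let nTeams := max teams (-(PySem.Int.floordiv (-(cleaned.length : Int)) players))
    (PySem.List.pyRange 0 nTeams).map (fun i =>
      let team := (PySem.List.slice cleaned (some (i * players)) (some ((i + 1) * players))).map pvTrunc16
      team ++ (PySem.List.pyRange (team.length : Int) players).map
        (fun j => "Player" ++ PySem.Int.toStr (j + 1)))

-- ===== PRECONDITION & SPEC =====
-- Pre_ excludes only inputs on which Python A does not return: duplicate cleaned names (ValueError),
-- and non-positive `players` where A's while-loops never terminate (cleaned names left nonempty, or
-- negative `players` with `teams` still demanding more teams).
def Pre_parse_player_names (names : String) (players : Int) (teams : Int) : Prop :=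
  (pvClean names).Nodup ∧ (0 < players ∨ (pvClean names = [] ∧ (players = 0 ∨ teams ≤ 0)))
instance (names : String) (players : Int) (teams : Int) : Decidable (Pre_parse_player_names names players teams) := by unfold Pre_parse_player_names; infer_instance

def pvWitness_parse_player_names : String × Int × Int := ("Alice,Bob", 2, 1)

def Spec_parse_player_names (names : String) (players : Int) (teams : Int) (out : List (List String)) : Prop := out = parse_player_names_alt names players teams
instance (names : String) (players : Int) (teams : Int) (out : List (List String)) : Decidable (Spec_parse_player_names names players teams out) := by unfold Spec_parse_player_names; infer_instance

-- ===== CLAIM (what is proved, stated in full; the proofs are below) =====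
def Claim_equal_parse_player_names : Prop := ∀ (names : String) (players : Int) (teams : Int), Dom_parse_player_names names players teams → Pre_parse_player_names names players teams → Spec_parse_player_names names players teams (parse_player_names names players teams)

-- ===== LEMMAS AND PROOFS =====

-- one padded team made from a chunk of at most `players` names
def pvMkTeam (p : Int) (chunk : List String) : List String :=
  chunk.map pvTrunc16 ++
    (PySem.List.pyRange (chunk.length : Int) p).map (fun j => "Player" ++ PySem.Int.toStr (j + 1))

-- n teams built chunk by chunk from the front of the list
def pvBuildN (p : Int) : Nat → List String → List (List String)
  | 0, _ => []
  | n + 1, l => pvMkTeam p (l.take p.toNat) :: pvBuildN p n (l.drop p.toNat)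

def pvCeil (m pN : Nat) : Nat := (m + pN - 1) / pN

lemma pvCeil_zero (pN : Nat) : pvCeil 0 pN = 0 := by
  unfold pvCeil
  rcases Nat.eq_zero_or_pos pN with h | h
  · simp [h]
  · simpa using Nat.div_eq_of_lt (by omega)

lemma pvCeil_le (m pN : Nat) : pvCeil m pN ≤ m := by
  unfold pvCeil
  rcases Nat.eq_zero_or_pos pN with h | h
  · simp [h]
  · have h1 : m ≤ pN * m := Nat.le_mul_of_pos_left m h
    have h2 : pN * (m + 1) = pN * m + pN := by ring
    have h3 : m + pN - 1 < pN * (m + 1) := by omega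
    have := Nat.div_lt_of_lt_mul h3
    omega

lemma pvCeil_sub (m pN : Nat) (hp : 0 < pN) (hm : 0 < m) :
    pvCeil m pN = pvCeil (m - pN) pN + 1 := by
  unfold pvCeil
  rcases Nat.lt_or_ge pN m with h | h
  · have e : m + pN - 1 = (m - pN + pN - 1) + pN := by omega
    rw [e, Nat.add_div_right _ hp]
  · have h1 : (m + pN - 1) / pN = 1 := Nat.div_eq_of_lt_le (by omega) (by omega)
    have h2 : (m - pN + pN - 1) / pN = 0 := Nat.div_eq_of_lt (by omega)
    omega

-- Python's -(-m // p) is the ceiling of m / p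
lemma pvCeil_int (m : Nat) (p : Int) (hp : 0 < p) :
    -(PySem.Int.floordiv (-(m : Int)) p) = (pvCeil m p.toNat : Int) := by
  obtain ⟨hle, hlt⟩ := (PySem.Int.floordiv_eq_iff_of_pos hp).mp (rfl : PySem.Int.floordiv (-(m : Int)) p = _)
  set q := PySem.Int.floordiv (-(m : Int)) p with hq
  have hq0 : q ≤ 0 := by nlinarith
  set pN := p.toNat with hpN
  have hpp : (pN : Int) = p := Int.toNat_of_nonneg hp.le
  have hpN0 : 0 < pN := by omega
  obtain ⟨c, hc⟩ : ∃ c : Nat, (c : Int) = -q := ⟨(-q).toNat, Int.toNat_of_nonneg (by omega)⟩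
  have h1 : (m : Int) ≤ c * pN := by rw [hc, hpp]; nlinarith
  have h2 : ((c : Int) - 1) * pN < m := by rw [hc, hpp]; nlinarith
  rw [← hc]
  congr 1
  unfold pvCeil
  rcases Nat.eq_zero_or_pos c with h0 | h0
  · subst h0
    have : m = 0 := by omega
    subst this
    symm; simpa using Nat.div_eq_of_lt (by omega)
  · obtain ⟨c', rfl⟩ : ∃ c', c = c' + 1 := ⟨c - 1, by omega⟩
    symm
    apply Nat.div_eq_of_lt_le
    · have h2' : ((c' : Int)) * pN < m := by
        have : ((c' : Int) + 1 - 1) * pN < m := by exact_mod_cast h2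
        simpa using this
      have h2n : c' * pN < m := by exact_mod_cast h2'
      have he : (c' + 1) * pN = c' * pN + pN := by ring
      omega
    · have h1' : m ≤ (c' + 1) * pN := by exact_mod_cast h1
      have he : (c' + 1 + 1) * pN = (c' + 1) * pN + pN := by ring
      omega

lemma pvPadA_spec : ∀ (k : Nat) (team : List String) (p : Int), (team.length : Int) + k = p →
    pvPadA k team p = team ++ (PySem.List.pyRange (team.length : Int) p).map
      (fun j => "Player" ++ PySem.Int.toStr (j + 1)) := by
  intro k
  induction k with
  | zero =>
    intro team p h
    rw [pvPadA, PySem.List.pyRange_one_eq_nil (by omega)]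
    simp
  | succ f ih =>
    intro team p h
    rw [pvPadA, if_neg (by omega)]
    rw [ih _ p (by simp; omega)]
    rw [PySem.List.pyRange_one_cons (a := (team.length : Int)) (by omega)]
    simp

lemma pvBuildN_nil (p : Int) : ∀ n : Nat, pvBuildN p n [] = List.replicate n (pvMkTeam p []) := by
  intro n
  induction n with
  | zero => rfl
  | succ k ih => simp [pvBuildN, ih, List.replicate_succ]

-- the padded team A builds from the remaining names equals pvMkTeam of the front chunk
lemma pvTeam_eq (l : List String) (p : Int) (hp : 0 ≤ p) :
    pvPadA (p - (((PySem.List.slice l none (some p)).map pvTrunc16).length : Int)).toNat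
        ((PySem.List.slice l none (some p)).map pvTrunc16) p
      = pvMkTeam p (l.take p.toNat) := by
  rw [PySem.List.slice_to l hp]
  have hlen : ((l.take p.toNat).map pvTrunc16).length = (l.take p.toNat).length := by simp
  have hle : (l.take p.toNat).length ≤ p.toNat := by simp [List.length_take]
  rw [pvPadA_spec _ _ p (by rw [hlen]; omega)]
  unfold pvMkTeam
  rw [hlen]

lemma pvN_dec (a : Int) (c c' : Nat) (h : (c = c' + 1) ∨ (c = 0 ∧ c' = 0 ∧ 1 ≤ a)) :
    max (a - 1).toNat c' = max a.toNat c - 1 := by omega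

-- A's team built when no names remain: `players` placeholder entries
lemma pvTeamNil_eq (p : Int) :
    pvPadA (p - (((PySem.List.slice ([] : List String) none (some p)).map pvTrunc16).length : Int)).toNat
        ((PySem.List.slice ([] : List String) none (some p)).map pvTrunc16) p = pvMkTeam p [] := by
  have hnil : PySem.List.slice ([] : List String) none (some p) = [] := by
    simp [PySem.List.slice]
  rw [hnil]
  simp only [List.map_nil, List.length_nil, Nat.cast_zero, sub_zero]
  rcases Nat.eq_zero_or_pos p.toNat with h0 | h0
  · rw [show p.toNat = 0 from h0, pvPadA]
    unfold pvMkTeam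
    rw [PySem.List.pyRange_one_eq_nil (by omega)]
    simp
  · rw [pvPadA_spec _ _ p (by simp; omega)]
    unfold pvMkTeam
    simp

lemma pvLoopA_nil (p t : Int) : ∀ (fuel : Nat) (ret : List (List String)),
    (t - ret.length).toNat ≤ fuel →
    pvLoopA fuel [] ret p t = ret ++ List.replicate (t - (ret.length : Int)).toNat (pvMkTeam p []) := by
  intro fuel
  induction fuel with
  | zero =>
    intro ret hf
    rw [pvLoopA, show (t - (ret.length : Int)).toNat = 0 from by omega]
    simp
  | succ f ih =>
    intro ret hf
    by_cases hcz : (ret.length : Int) < t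
    · rw [pvLoopA, if_pos (Or.inr hcz), pvTeamNil_eq,
        show PySem.List.slice ([] : List String) (some p) none = [] from by simp [PySem.List.slice]]
      rw [ih (ret ++ [pvMkTeam p []]) (by simp; omega)]
      have hlen : ((ret ++ [pvMkTeam p []]).length : Int) = (ret.length : Int) + 1 := by push_cast; simp
      rw [hlen, List.append_assoc]
      congr 1
      rw [show (t - (ret.length : Int)).toNat = (t - ((ret.length : Int) + 1)).toNat + 1 from by omega]
      simp [List.replicate_succ]
    · rw [pvLoopA, if_neg (by simp [hcz])]
      rw [show (t - (ret.length : Int)).toNat = 0 from by omega]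
      simp

-- the loop invariant: A's while-loop produces the chunked teams
lemma pvLoopA_spec (p t : Int) : ∀ (fuel : Nat) (l : List String) (ret : List (List String)),
    (0 < p ∨ l = []) →
    max (t - ret.length).toNat (pvCeil l.length p.toNat) ≤ fuel →
    pvLoopA fuel l ret p t = ret ++ pvBuildN p (max (t - ret.length).toNat (pvCeil l.length p.toNat)) l := by
  intro fuel
  induction fuel with
  | zero =>
    intro l ret hp hf
    have h0 : max (t - ret.length).toNat (pvCeil l.length p.toNat) = 0 := by omega
    rw [h0, pvLoopA]
    simp [pvBuildN]
  | succ f ih =>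
    intro l ret hp hf
    rcases hp with hp' | hp'
    swap
    · subst hp'
      have hc0 : pvCeil ([] : List String).length p.toNat = 0 := by
        simpa using pvCeil_zero p.toNat
      rw [hc0, Nat.max_zero] at hf ⊢
      rw [pvBuildN_nil]
      exact pvLoopA_nil p t (f + 1) ret hf
    by_cases hc : l ≠ [] ∨ (ret.length : Int) < t
    · set N := max (t - ret.length).toNat (pvCeil l.length p.toNat) with hN
      rw [pvLoopA, if_pos hc]
      have hp0 : (0 : Int) ≤ p := hp'.le
      have hcc : (pvCeil l.length p.toNat = pvCeil (l.length - p.toNat) p.toNat + 1)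
          ∨ (pvCeil l.length p.toNat = 0 ∧ pvCeil (l.length - p.toNat) p.toNat = 0 ∧ 1 ≤ t - ret.length) := by
        rcases Nat.eq_zero_or_pos l.length with h0 | h0
        · right
          rw [h0, Nat.zero_sub]
          refine ⟨by simpa using pvCeil_zero _, by simpa using pvCeil_zero _, ?_⟩
          rcases hc with h | h
          · exact absurd (List.length_eq_zero_iff.mp h0) h
          · omega
        · left; exact pvCeil_sub l.length p.toNat (by omega) h0
      rw [pvTeam_eq l p hp0, PySem.List.slice_from l hp0]
      have hrec := ih (l.drop p.toNat) (ret ++ [pvMkTeam p (l.take p.toNat)]) (Or.inl hp') ?_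
      · rw [hrec]
        have hlen : ((ret ++ [pvMkTeam p (l.take p.toNat)]).length : Int) = (ret.length : Int) + 1 := by
          push_cast; simp
        rw [hlen]
        have hdl : (l.drop p.toNat).length = l.length - p.toNat := by simp
        have hEq : max (t - ((ret.length : Int) + 1)).toNat (pvCeil (l.drop p.toNat).length p.toNat) = N - 1 := by
          rw [hdl, show t - ((ret.length : Int) + 1) = (t - ret.length) - 1 by ring, hN]
          exact pvN_dec _ _ _ hcc
        rw [hEq]
        have hN1 : 1 ≤ N := by rw [hN]; omega
        rw [List.append_assoc]
        congr 1
        rw [show N = (N - 1) + 1 by omega]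
        simp [pvBuildN]
      · have hlen : ((ret ++ [pvMkTeam p (l.take p.toNat)]).length : Int) = (ret.length : Int) + 1 := by
          push_cast; simp
        rw [hlen]
        have hdl : (l.drop p.toNat).length = l.length - p.toNat := by simp
        rw [hdl, show t - ((ret.length : Int) + 1) = (t - ret.length) - 1 by ring,
          pvN_dec _ _ _ hcc]
        omega
    · push_neg at hc
      obtain ⟨hnil, hle⟩ := hc
      have h0 : max (t - ret.length).toNat (pvCeil l.length p.toNat) = 0 := by
        rw [hnil]
        have := pvCeil_zero p.toNat
        simp only [List.length_nil]
        omega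
      rw [h0, pvLoopA, if_neg (by push_neg; exact ⟨hnil, hle⟩)]
      simp [pvBuildN]

-- shifting B's chunk index by one team equals dropping the first chunk
lemma pvSlice_shift (l : List String) (p : Int) (hp : 0 < p) (k : Nat) :
    PySem.List.slice l (some (((k : Int) + 1) * p)) (some (((k : Int) + 2) * p))
      = PySem.List.slice (l.drop p.toNat) (some ((k : Int) * p)) (some (((k : Int) + 1) * p)) := by
  have hpp : ((p.toNat : Int)) = p := Int.toNat_of_nonneg hp.le
  have e1 : ((k : Int) + 1) * p = (((k + 1) * p.toNat : Nat) : Int) := by push_cast [hpp]; ring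
  have e2 : ((k : Int) + 2) * p = (((k + 2) * p.toNat : Nat) : Int) := by push_cast [hpp]; ring
  have e0 : (k : Int) * p = ((k * p.toNat : Nat) : Int) := by push_cast [hpp]; ring
  have a1 : (k + 1) * p.toNat = k * p.toNat + p.toNat := by ring
  have a2 : (k + 2) * p.toNat = (k + 1) * p.toNat + p.toNat := by ring
  rw [e0, e1, e2, PySem.List.slice_natCast, PySem.List.slice_natCast, List.drop_drop]
  congr 1
  · omega
  · congr 1
    omega

-- B's indexed chunking equals the recursive chunking
lemma pvB_index (p : Int) (hp : 0 < p) : ∀ (n : Nat) (l : List String),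
    (List.range n).map (fun (k : Nat) => pvMkTeam p (PySem.List.slice l (some ((k : Int) * p)) (some (((k : Int) + 1) * p)))) = pvBuildN p n l := by
  intro n
  induction n with
  | zero => intro l; rfl
  | succ m ih =>
    intro l
    rw [List.range_succ_eq_map, List.map_cons, List.map_map]
    congr 1
    · rw [show (((0 : Nat) : Int)) * p = 0 from by push_cast; ring]
      rw [PySem.List.slice_zero_start, PySem.List.slice_to l (by push_cast; omega)]
      congr 2
      push_cast
      ring
    · rw [← ih (l.drop p.toNat)]
      apply List.map_congr_left
      intro k _
      simp only [Function.comp_apply]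
      rw [show ((Nat.succ k : Nat) : Int) = (k : Int) + 1 from by push_cast; ring]
      rw [show ((k : Int) + 1) + 1 = (k : Int) + 2 from by ring]
      rw [pvSlice_shift l p hp k]

lemma pvMain (names : String) (players teams : Int)
    (hpre : Pre_parse_player_names names players teams) :
    parse_player_names names players teams = parse_player_names_alt names players teams := by
  obtain ⟨hnd, hcase⟩ := hpre
  unfold parse_player_names parse_player_names_alt
  by_cases hdup : (pvClean names).length ≠ (PySem.Set.ofList (pvClean names)).length
  · simp only [if_pos hdup]
  · simp only [if_neg hdup]
    set cleaned := pvClean names with hcl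
    by_cases hp : 0 < players
    · rw [if_neg (by omega)]
      have hA := pvLoopA_spec players teams (cleaned.length + teams.toNat) cleaned [] (Or.inl hp)
        (by
          have := pvCeil_le cleaned.length players.toNat
          simp only [List.length_nil, Nat.cast_zero, sub_zero]
          omega)
      simp only [List.length_nil, Nat.cast_zero, sub_zero, List.nil_append] at hA
      rw [hA]
      rw [pvCeil_int cleaned.length players hp]
      rw [show max teams ((pvCeil cleaned.length players.toNat : Nat) : Int)
            = ((max teams.toNat (pvCeil cleaned.length players.toNat) : Nat) : Int) from by omega]
      rw [PySem.List.pyRange_zero_nat]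
      rw [List.map_map]
      rw [← pvB_index players hp (max teams.toNat (pvCeil cleaned.length players.toNat)) cleaned]
      apply List.map_congr_left
      intro k _
      simp only [Function.comp_apply]
      unfold pvMkTeam
      rw [List.length_map]
    · rcases hcase with h | ⟨hnil, h0⟩
      · omega
      rw [if_pos (by omega)]
      rw [hnil]
      have hA := pvLoopA_nil players teams (([] : List String).length + teams.toNat) []
        (by simp only [List.length_nil, Nat.cast_zero, sub_zero, Nat.zero_add]; omega)
      simp only [List.length_nil, Nat.cast_zero, sub_zero, List.nil_append] at hA ⊢
      rw [hA]
      rw [PySem.List.pyRange_zero, List.map_map]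
      have hconst : (List.range teams.toNat).map ((fun _ => ([] : List String)) ∘ (fun k : Nat => (k : Int)))
          = List.replicate teams.toNat [] := by
        rw [List.eq_replicate_iff]
        exact ⟨by simp, by intro b hb; simp at hb; exact hb.2⟩
      rw [hconst]
      rcases h0 with h0 | h0
      · have hmk : pvMkTeam players [] = [] := by
          unfold pvMkTeam
          rw [PySem.List.pyRange_one_eq_nil (by omega)]
          simp
        rw [hmk]
      · rw [show teams.toNat = 0 from by omega]
        simp

-- ===== VERDICT (by name: the statement is the Claim_ definition above) =====
theorem parse_player_names_spec : Claim_equal_parse_player_names := by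
  intro names players teams _ hpre
  show parse_player_names names players teams = parse_player_names_alt names players teams
  exact pvMain names players teams hpre
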